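-- pv_equiv track=rewrite | github.com/aleksandratchernaya/MidtermAleksandraTchernaya | midterm.py | find_un_an_occurrences
-- ===== SOURCE A (Python) =====
-- def find_un_an_occurrences(text):
--     # Initialize a counter to keep track of pattern matches
--     count = 0
--
--     # Iterate over each index in the text
--     for i in range(len(text)):
--         # Try to extract a substring that potentially matches our pattern
--         # We look ahead for the length of the shortest possible match ("unan" = 4 characters) and extend to the end of the string to ensure we don't miss longer matches.
--         for j in range(i + 4, len(text) + 1):
--             substring = text[i:j]
--
--             # Check if the substring matches our pattern
--             if substring.startswith('un') and substring.endswith('an'):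
--                 count += 1
--
--     return count
-- ===== SOURCE B (Python) =====
-- def find_un_an_occurrences(text):
--     # One left-to-right pass over end positions j, keeping a running count of
--     # 'un' starts that are at least 4 before j.
--     n = len(text)
--     un_seen = 0
--     count = 0
--     for j in range(4, n + 1):
--         if text[j-4:j-2] == 'un':
--             un_seen += 1
--         if text[j-2:j] == 'an':
--             count += un_seen
--     return count
-- ===== Notes on version B (the rewrite author's own statement) =====
-- stated objective: faster
-- what changed: A enumerates every (start, end) index pair and tests each slice; B makes one left-to-right pass over end positions, keeping a running count of 'un' starts at least 4 before the current end and adding it whenever an 'an' ends there.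
import Mathlib
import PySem

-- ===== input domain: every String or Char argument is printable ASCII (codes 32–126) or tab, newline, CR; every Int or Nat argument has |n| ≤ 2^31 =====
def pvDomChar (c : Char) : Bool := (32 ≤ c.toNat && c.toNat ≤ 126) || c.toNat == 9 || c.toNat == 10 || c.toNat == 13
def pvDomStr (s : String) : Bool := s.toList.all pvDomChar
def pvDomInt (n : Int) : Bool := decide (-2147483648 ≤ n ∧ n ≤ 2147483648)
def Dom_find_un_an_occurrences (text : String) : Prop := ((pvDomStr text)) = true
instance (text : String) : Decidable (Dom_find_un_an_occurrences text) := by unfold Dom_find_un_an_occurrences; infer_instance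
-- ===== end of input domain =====

-- B replaces A's enumeration of all (start, end) index pairs (each tested with a fresh slice)
-- by a single left-to-right pass over end positions that keeps a running count of the 'un'
-- starts lying at least 4 before the current end position.

-- ===== PORT A =====
def find_un_an_occurrences (text : String) : Int :=
  let s := text.toList
  (PySem.List.pyRange 0 (s.length : Int) 1).foldl (fun count i =>
    (PySem.List.pyRange (i + 4) ((s.length : Int) + 1) 1).foldl (fun count j =>
      let substring := PySem.List.slice s (some i) (some j)
      if PySem.Chars.startswith substring ['u','n'] && PySem.Chars.endswith substring ['a','n']
      then count + 1 else count) count) 0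

-- ===== PORT B =====
def find_un_an_occurrences_alt (text : String) : Int :=
  let s := text.toList
  let n : Int := s.length
  ((PySem.List.pyRange 4 (n + 1) 1).foldl (fun (st : Int × Int) j =>
    let un_seen := if PySem.List.slice s (some (j - 4)) (some (j - 2)) = ['u','n'] then st.1 + 1 else st.1
    let count := if PySem.List.slice s (some (j - 2)) (some j) = ['a','n'] then st.2 + un_seen else st.2
    (un_seen, count)) ((0 : Int), (0 : Int))).2

-- ===== PRECONDITION & SPEC =====
def Spec_find_un_an_occurrences (text : String) (out : Int) : Prop := out = find_un_an_occurrences_alt text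
instance (text : String) (out : Int) : Decidable (Spec_find_un_an_occurrences text out) := by unfold Spec_find_un_an_occurrences; infer_instance

-- ===== CLAIM (what is proved, stated in full; the proofs are below) =====
def Claim_equal_find_un_an_occurrences : Prop := ∀ (text : String), Dom_find_un_an_occurrences text → Spec_find_un_an_occurrences text (find_un_an_occurrences text)

-- ===== LEMMAS AND PROOFS =====

-- 'un' occurs at (0-based) position i of s
def unB (s : List Char) (i : Nat) : Bool := decide ((s.drop i).take 2 = ['u','n'])
-- 'an' occurs ending at (exclusive end) position j of s, i.e. at position j-2
def anB (s : List Char) (j : Nat) : Bool := decide ((s.drop (j - 2)).take 2 = ['a','n'])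

-- A's slice test for the pair (i, j) is exactly "un at i and an ending at j"
theorem cond_char (s : List Char) (iN jN : Nat) (h4 : iN + 4 ≤ jN) (hn : jN ≤ s.length) :
    (PySem.Chars.startswith (PySem.List.slice s (some (iN:Int)) (some (jN:Int))) ['u','n'] &&
     PySem.Chars.endswith (PySem.List.slice s (some (iN:Int)) (some (jN:Int))) ['a','n'])
    = (unB s iN && anB s jN) := by
  rw [PySem.List.slice_natCast]
  have hlen : ((s.drop iN).take (jN - iN)).length = jN - iN := by
    simp [List.length_take, List.length_drop]; omega
  have hstart : PySem.Chars.startswith ((s.drop iN).take (jN - iN)) ['u','n'] = unB s iN := by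
    rw [Bool.eq_iff_iff, PySem.Chars.startswith_iff, List.prefix_iff_eq_take,
        show ((['u','n'] : List Char)).length = 2 from rfl,
        List.take_take, Nat.min_eq_left (by omega)]
    unfold unB
    rw [decide_eq_true_eq, eq_comm]
  have hend : PySem.Chars.endswith ((s.drop iN).take (jN - iN)) ['a','n'] = anB s jN := by
    have hdt : ((s.drop iN).take (jN - iN)).drop (jN - iN - 2) = (s.drop (jN - 2)).take 2 := by
      rw [List.drop_take, List.drop_drop]
      rw [show jN - iN - (jN - iN - 2) = 2 by omega, show iN + (jN - iN - 2) = jN - 2 by omega]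
    rw [Bool.eq_iff_iff, PySem.Chars.endswith_iff, List.suffix_iff_eq_drop, hlen,
        show ((['a','n'] : List Char)).length = 2 from rfl, hdt]
    unfold anB
    rw [decide_eq_true_eq, eq_comm]
  rw [hstart, hend]

theorem countP_range_sum (p : Nat → Bool) (m : Nat) :
    (((List.range m).countP p : Nat) : Int) = ∑ k ∈ Finset.range m, (if p k then (1:Int) else 0) := by
  induction m with
  | zero => simp
  | succ m ih =>
      rw [List.range_succ, List.countP_append, Finset.sum_range_succ, ← ih]
      by_cases hp : p m <;> simp [hp]

-- A's inner loop for a fixed start i, as a sum over end positions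
theorem inner_eq (s : List Char) (iN : Nat) :
    (((PySem.List.pyRange ((iN:Int)+4) ((s.length:Int)+1) 1).countP
        (fun j => PySem.Chars.startswith (PySem.List.slice s (some (iN:Int)) (some j)) ['u','n'] &&
                  PySem.Chars.endswith (PySem.List.slice s (some (iN:Int)) (some j)) ['a','n']) : Nat) : Int)
    = ∑ j ∈ Finset.Ico (iN+4) (s.length+1), (if unB s iN && anB s j then (1:Int) else 0) := by
  rw [PySem.List.pyRange_one, List.countP_map]
  rw [Finset.sum_Ico_eq_sum_range]
  set M := (((s.length:Int)+1) - ((iN:Int)+4)).toNat with hM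
  have hMeq : M = s.length + 1 - (iN + 4) := by omega
  have hcong : ∀ k ∈ List.range M,
      ((fun j => PySem.Chars.startswith (PySem.List.slice s (some (iN:Int)) (some j)) ['u','n'] &&
                  PySem.Chars.endswith (PySem.List.slice s (some (iN:Int)) (some j)) ['a','n']) ∘
        (fun k : Nat => ((iN:Int)+4) + (k:Int))) k = (fun k => unB s iN && anB s (iN+4+k)) k := by
    intro k hk
    rw [List.mem_range] at hk
    have hj : ((iN:Int)+4) + (k:Int) = (((iN+4+k : Nat)) : Int) := by push_cast; ring
    simp only [Function.comp_apply, hj]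
    exact cond_char s iN (iN+4+k) (by omega) (by omega)
  rw [List.countP_congr (fun x hx => by rw [hcong x hx])]
  rw [countP_range_sum, hMeq]

-- A as a double sum over (start, end) pairs
theorem A_eq (text : String) :
    find_un_an_occurrences text
    = ∑ i ∈ Finset.range text.toList.length, ∑ j ∈ Finset.Ico (i+4) (text.toList.length+1),
        (if unB text.toList i && anB text.toList j then (1:Int) else 0) := by
  unfold find_un_an_occurrences
  set s := text.toList with hs
  simp only [PySem.List.pyRange_zero_natCast, List.foldl_map]
  have hstep : ∀ (c : Int) (iN : Nat),
      (PySem.List.pyRange ((iN:Int) + 4) ((s.length : Int) + 1) 1).foldl (fun count j =>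
        let substring := PySem.List.slice s (some (iN:Int)) (some j)
        if PySem.Chars.startswith substring ['u','n'] && PySem.Chars.endswith substring ['a','n']
        then count + 1 else count) c
      = c + ∑ j ∈ Finset.Ico (iN+4) (s.length+1), (if unB s iN && anB s j then (1:Int) else 0) := by
    intro c iN
    rw [← inner_eq]
    exact PySem.List.foldl_if_add_one _ _ _
  rw [show (fun (x : Int) (y : ℕ) =>
        (PySem.List.pyRange ((y:Int) + 4) ((s.length : Int) + 1) 1).foldl (fun count j =>
          let substring := PySem.List.slice s (some (y:Int)) (some j)
          if PySem.Chars.startswith substring ['u','n'] && PySem.Chars.endswith substring ['a','n']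
          then count + 1 else count) x)
      = (fun (x : Int) (y : ℕ) =>
          x + ∑ j ∈ Finset.Ico (y+4) (s.length+1), (if unB s y && anB s j then (1:Int) else 0))
    from funext fun c => funext fun iN => hstep c iN]
  rw [PySem.List.foldl_add]
  simp
  rfl

-- B's loop invariant: running 'un' count and the answer so far
theorem B_fold (s : List Char) (m : Nat) :
    ((List.range m).map (fun k : Nat => (((4 + k : Nat)) : Int))).foldl
      (fun (st : Int × Int) j =>
        let un_seen := if PySem.List.slice s (some (j - 4)) (some (j - 2)) = ['u','n'] then st.1 + 1 else st.1
        let count := if PySem.List.slice s (some (j - 2)) (some j) = ['a','n'] then st.2 + un_seen else st.2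
        (un_seen, count)) ((0:Int), (0:Int))
    = ((((List.range m).countP (unB s) : Nat) : Int),
       ∑ k ∈ Finset.range m, (if anB s (4+k) then (((List.range (k+1)).countP (unB s) : Nat) : Int) else 0)) := by
  induction m with
  | zero => simp
  | succ m ih =>
      rw [List.range_succ, List.map_append, List.foldl_append, ih]
      simp only [List.map_cons, List.map_nil, List.foldl_cons, List.foldl_nil]
      have e1 : (((4 + m : Nat)) : Int) - 4 = ((m : Nat) : Int) := by push_cast; ring
      have e2 : (((4 + m : Nat)) : Int) - 2 = (((m+2) : Nat) : Int) := by push_cast; ring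
      rw [e1, e2, PySem.List.slice_natCast, PySem.List.slice_natCast]
      rw [show m + 2 - m = 2 by omega, show 4 + m - (m + 2) = 2 by omega]
      by_cases hu : (s.drop m).take 2 = ['u','n'] <;>
        by_cases ha : (s.drop (m+2)).take 2 = ['a','n'] <;>
          simp [hu, ha, unB, anB, show 4 + m - 2 = m + 2 by omega, List.range_succ,
                List.countP_append, Finset.sum_range_succ, List.countP_cons]

-- B as a sum over end positions
theorem B_eq (text : String) :
    find_un_an_occurrences_alt text
    = ∑ k ∈ Finset.range (text.toList.length - 3),
        (if anB text.toList (4+k) then (((List.range (k+1)).countP (unB text.toList) : Nat) : Int) else 0) := by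
  unfold find_un_an_occurrences_alt
  set s := text.toList with hs
  dsimp only
  rw [PySem.List.pyRange_one]
  have hM : (((s.length:Int)+1) - 4).toNat = s.length - 3 := by omega
  have hf : (fun k : Nat => (4:Int) + (k:Int)) = (fun k : Nat => (((4 + k : Nat)) : Int)) := by
    funext k; push_cast; ring
  rw [hM, hf, B_fold]

-- exchanging the two summations
theorem fubini (n : Nat) (F : Nat → Nat → Int) :
    ∑ i ∈ Finset.range n, ∑ j ∈ Finset.Ico (i+4) (n+1), F i j
    = ∑ j ∈ Finset.Ico 4 (n+1), ∑ i ∈ Finset.range (j-3), F i j := by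
  apply Finset.sum_comm'
  intro i j
  simp only [Finset.mem_Ico, Finset.mem_range]
  omega

-- ===== VERDICT (by name: the statement is the Claim_ definition above) =====
theorem find_un_an_occurrences_spec : Claim_equal_find_un_an_occurrences := by
  intro text _
  unfold Spec_find_un_an_occurrences
  rw [A_eq, B_eq, fubini]
  set s := text.toList with hs
  rw [Finset.sum_Ico_eq_sum_range, show s.length + 1 - 4 = s.length - 3 by omega]
  apply Finset.sum_congr rfl
  intro k _
  rw [show 4 + k - 3 = k + 1 by omega]
  by_cases ha : anB s (4+k) <;> simp [ha, countP_range_sum]
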